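-- pv_equiv track=rewrite | github.com/KevinHou03/PythonLc | CS_326_algorithm/pos_neg.py | cross2
-- ===== SOURCE A (Python) =====
-- def cross2(li):
--     pos = 0
--     neg = 1
--
--     while True:
--         while pos < len(li) and li[pos] >= 0 :
--             pos += 2
--         while neg < len(li) and li[neg] < 0  :
--             neg += 2
--
--         if pos < len(li) and neg < len(li):
--             li[pos], li[neg] = li[neg], li[pos]
--
--         else:
--             break
--     return li
-- ===== SOURCE B (Python) =====
-- def cross2(li):
--     evens = [i for i in range(0, len(li), 2) if li[i] < 0]
--     odds = [j for j in range(1, len(li), 2) if li[j] >= 0]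
--     for a, b in zip(evens, odds):
--         li[a], li[b] = li[b], li[a]
--     return li
-- ===== Notes on version B (the rewrite author's own statement) =====
-- stated objective: simpler
-- what changed: A's interleaved while-loops with stateful pos/neg cursors and repeated rescans are replaced by two index comprehensions over the original list (even indices holding negatives, odd indices holding non-negatives) followed by a single zip of in-place swaps.
import Mathlib
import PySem

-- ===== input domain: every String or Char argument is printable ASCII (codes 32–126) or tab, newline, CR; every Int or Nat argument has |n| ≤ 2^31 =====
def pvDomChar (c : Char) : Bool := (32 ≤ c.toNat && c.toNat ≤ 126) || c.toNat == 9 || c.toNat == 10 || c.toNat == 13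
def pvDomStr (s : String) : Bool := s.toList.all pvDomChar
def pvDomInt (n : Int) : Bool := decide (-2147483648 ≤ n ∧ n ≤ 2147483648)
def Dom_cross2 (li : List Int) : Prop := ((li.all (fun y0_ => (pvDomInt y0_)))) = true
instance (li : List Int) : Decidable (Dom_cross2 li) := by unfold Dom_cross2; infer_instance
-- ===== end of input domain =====

-- B replaces A's interleaved while-loops with two index comprehensions plus a zip of in-place
-- swaps (objective: simpler). Both the Python A and the Python B mutate the list in place and
-- return it; the proved equivalence is about the returned value.

-- ===== PORT A =====
-- simultaneous assignment li[a], li[b] = li[b], li[a] (indices always in range where used)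
def swapAt (l : List Int) (a b : Nat) : List Int :=
  (l.set a (l.getD b 0)).set b (l.getD a 0)

-- inner 'while pos < len(li) and <not pred(li[pos])>: pos += 2' (pred is the stopping test)
def scanA (li : List Int) (pred : Int → Bool) (pos : Nat) : Nat :=
  if pos < li.length ∧ ¬ pred (li.getD pos 0) then scanA li pred (pos + 2) else pos
termination_by li.length - pos

-- outer 'while True' loop; each pass through the body consumes one unit of fuel, and
-- li.length + 1 units are proved sufficient (lemma fuel_enough below)
def loopA : Nat → List Int → Nat → Nat → List Int
  | 0, li, _, _ => li
  | f + 1, li, pos, neg =>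
    let p := scanA li (fun x => decide (x < 0)) pos
    let n := scanA li (fun x => decide (0 ≤ x)) neg
    if p < li.length ∧ n < li.length then loopA f (swapAt li p n) p n else li

def cross2 (li : List Int) : List Int := loopA (li.length + 1) li 0 1

-- ===== PORT B =====
-- range(0, len(li), 2) = List.range' 0 ((len+1)/2) 2 ; range(1, len(li), 2) = List.range' 1 (len/2) 2
def cross2_alt (li : List Int) : List Int :=
  let evens := (List.range' 0 ((li.length + 1) / 2) 2).filter (fun i => decide (li.getD i 0 < 0))
  let odds := (List.range' 1 (li.length / 2) 2).filter (fun i => decide (0 ≤ li.getD i 0))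
  (evens.zip odds).foldl (fun l pr => swapAt l pr.1 pr.2) li

-- ===== PRECONDITION & SPEC =====
def Spec_cross2 (li : List Int) (out : List Int) : Prop := out = cross2_alt li
instance (li : List Int) (out : List Int) : Decidable (Spec_cross2 li out) := by unfold Spec_cross2; infer_instance

-- ===== CLAIM (what is proved, stated in full; the proofs are below) =====
def Claim_equal_cross2 : Prop := ∀ (li : List Int), Dom_cross2 li → Spec_cross2 li (cross2 li)

-- ===== LEMMAS AND PROOFS =====

-- proof-only helper: the even-parity-step indices i ≥ pos with pred li[i]
def idxFrom (li : List Int) (pred : Int → Bool) (pos : Nat) : List Nat :=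
  if pos < li.length then
    (if pred (li.getD pos 0) then pos :: idxFrom li pred (pos + 2) else idxFrom li pred (pos + 2))
  else []
termination_by li.length - pos

lemma idxFrom_nil_scan (li : List Int) (pred : Int → Bool) (pos : Nat)
    (h : idxFrom li pred pos = []) : li.length ≤ scanA li pred pos := by
  fun_induction idxFrom li pred pos with
  | case1 pos hl hp ih => simp at h
  | case2 pos hl hp ih =>
    rw [scanA, if_pos ⟨hl, by simp [← List.getD_eq_getElem?_getD, hp]⟩]
    exact ih h
  | case3 pos hl =>
    rw [scanA, if_neg (by omega)]
    omega

lemma idxFrom_cons_scan (li : List Int) (pred : Int → Bool) (pos p : Nat) (t : List Nat)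
    (h : idxFrom li pred pos = p :: t) :
    scanA li pred pos = p ∧ p < li.length ∧ pos ≤ p ∧ p % 2 = pos % 2 ∧
      pred (li.getD p 0) = true ∧ t = idxFrom li pred (p + 2) := by
  fun_induction idxFrom li pred pos with
  | case1 pos hl hp ih =>
    injection h with h1 h2
    subst h1
    rw [scanA, if_neg (by simp [← List.getD_eq_getElem?_getD, hp])]
    exact ⟨rfl, hl, le_rfl, rfl, hp, h2.symm⟩
  | case2 pos hl hp ih =>
    obtain ⟨h1, h2, h3, h4, h5, h6⟩ := ih h
    rw [scanA, if_pos ⟨hl, by simp [← List.getD_eq_getElem?_getD, hp]⟩]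
    exact ⟨h1, h2, by omega, by omega, h5, h6⟩
  | case3 pos hl => simp at h

lemma idxFrom_congr (li li' : List Int) (pred : Int → Bool) (pos : Nat)
    (hlen : li'.length = li.length)
    (hag : ∀ i, pos ≤ i → i % 2 = pos % 2 → li'.getD i 0 = li.getD i 0) :
    idxFrom li' pred pos = idxFrom li pred pos := by
  fun_induction idxFrom li pred pos generalizing li' with
  | case1 pos hl hp ih =>
    have hv := hag pos le_rfl rfl
    have ih' := ih li' hlen (fun i h1 h2 => hag i (by omega) (by omega))
    rw [idxFrom]
    simp only [hlen, hl, if_pos, hv, hp, ih']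
  | case2 pos hl hp ih =>
    have hv := hag pos le_rfl rfl
    have ih' := ih li' hlen (fun i h1 h2 => hag i (by omega) (by omega))
    have hc : ¬ (pred (li'.getD pos 0) = true) := by rw [hv]; exact hp
    rw [idxFrom, if_pos (show pos < li'.length by omega), if_neg hc, ih']
  | case3 pos hl =>
    conv_lhs => rw [idxFrom]
    rw [if_neg (show ¬ pos < li'.length by omega)]

lemma idxFrom_length (li : List Int) (pred : Int → Bool) (pos : Nat) :
    2 * (idxFrom li pred pos).length ≤ li.length + 1 - pos := by
  fun_induction idxFrom li pred pos with
  | case1 pos hl hp ih => simp only [List.length_cons]; omega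
  | case2 pos hl hp ih => omega
  | case3 pos hl => simp

lemma idxFrom_eq_filter (li : List Int) (pred : Int → Bool) (pos : Nat) :
    idxFrom li pred pos =
      (List.range' pos ((li.length + 1 - pos) / 2) 2).filter (fun i => pred (li.getD i 0)) := by
  fun_induction idxFrom li pred pos with
  | case1 pos hl hp ih =>
    have hn : (li.length + 1 - pos) / 2 = (li.length + 1 - (pos + 2)) / 2 + 1 := by omega
    rw [hn, List.range'_succ, List.filter_cons, if_pos (by simpa using hp)]
    simp [ih]
  | case2 pos hl hp ih =>
    have hn : (li.length + 1 - pos) / 2 = (li.length + 1 - (pos + 2)) / 2 + 1 := by omega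
    rw [hn, List.range'_succ, List.filter_cons, if_neg (by simpa using hp)]
    simp [ih]
  | case3 pos hl =>
    have hn : (li.length + 1 - pos) / 2 = 0 := by omega
    simp [hn]

lemma swapAt_length (l : List Int) (a b : Nat) : (swapAt l a b).length = l.length := by
  simp [swapAt]

lemma swapAt_getD_other (l : List Int) (a b i : Nat) (ha : i ≠ a) (hb : i ≠ b) :
    (swapAt l a b).getD i 0 = l.getD i 0 := by
  simp [swapAt, List.getD, List.getElem?_set_ne (Ne.symm hb), List.getElem?_set_ne (Ne.symm ha)]

lemma swapAt_getD_fst (l : List Int) (a b : Nat) (ha : a < l.length) (hne : a ≠ b) :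
    (swapAt l a b).getD a 0 = l.getD b 0 := by
  simp [swapAt, List.getD, ha, Ne.symm hne]

lemma swapAt_getD_snd (l : List Int) (a b : Nat) (hb : b < l.length) :
    (swapAt l a b).getD b 0 = l.getD a 0 := by
  simp [swapAt, List.getD, hb]

lemma loop_eq (f : Nat) (li : List Int) (pos neg : Nat)
    (hp2 : pos % 2 = 0) (hn2 : neg % 2 = 1)
    (hf : min (idxFrom li (fun x => decide (x < 0)) pos).length
              (idxFrom li (fun x => decide (0 ≤ x)) neg).length < f) :
    loopA f li pos neg =
      ((idxFrom li (fun x => decide (x < 0)) pos).zip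
        (idxFrom li (fun x => decide (0 ≤ x)) neg)).foldl
        (fun l pr => swapAt l pr.1 pr.2) li := by
  induction f generalizing li pos neg with
  | zero => omega
  | succ f ih =>
    rw [loopA]
    cases hE : idxFrom li (fun x => decide (x < 0)) pos with
    | nil =>
      have hs := idxFrom_nil_scan li _ pos hE
      simp only [List.zip_nil_left, List.foldl_nil]
      have : ¬ (scanA li (fun x => decide (x < 0)) pos < li.length ∧
          scanA li (fun x => decide (0 ≤ x)) neg < li.length) := by
        rintro ⟨h1, _⟩; omega
      simp [this]
    | cons p E' =>
      cases hO : idxFrom li (fun x => decide (0 ≤ x)) neg with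
      | nil =>
        have hs := idxFrom_nil_scan li _ neg hO
        simp only [List.zip_nil_right, List.foldl_nil]
        have : ¬ (scanA li (fun x => decide (x < 0)) pos < li.length ∧
            scanA li (fun x => decide (0 ≤ x)) neg < li.length) := by
          rintro ⟨_, h2⟩; omega
        simp [this]
      | cons n O' =>
        obtain ⟨hsp, hpl, hple, hppar, hpneg, hE'⟩ := idxFrom_cons_scan li _ pos p E' hE
        obtain ⟨hsn, hnl, hnle, hnpar, hnpos, hO'⟩ := idxFrom_cons_scan li _ neg n O' hO
        have hpn : p ≠ n := by omega
        simp only [hsp, hsn, hpl, hnl, and_self, if_pos]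
        set li' := swapAt li p n with hli'
        have hlen' : li'.length = li.length := swapAt_length li p n
        -- the updated list: position p now holds the old li[n] (≥ 0), position n the old li[p] (< 0)
        have hvp : li'.getD p 0 = li.getD n 0 := swapAt_getD_fst li p n hpl hpn
        have hvn : li'.getD n 0 = li.getD p 0 := swapAt_getD_snd li p n hnl
        have hagE : ∀ i, p + 2 ≤ i → i % 2 = (p + 2) % 2 → li'.getD i 0 = li.getD i 0 := by
          intro i h1 h2
          exact swapAt_getD_other li p n i (by omega) (by omega)
        have hagO : ∀ i, n + 2 ≤ i → i % 2 = (n + 2) % 2 → li'.getD i 0 = li.getD i 0 := by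
          intro i h1 h2
          exact swapAt_getD_other li p n i (by omega) (by omega)
        have hE2 : idxFrom li' (fun x => decide (x < 0)) p = E' := by
          rw [idxFrom]
          have : ¬ ((li'.getD p 0 < 0)) := by
            rw [hvp]; simpa using hnpos
          simp only [hlen', hpl, if_pos, decide_eq_true_eq, this, if_neg, not_false_iff]
          rw [idxFrom_congr li li' _ (p + 2) hlen' hagE, hE']
        have hO2 : idxFrom li' (fun x => decide (0 ≤ x)) n = O' := by
          rw [idxFrom]
          have : ¬ ((0 : Int) ≤ li'.getD n 0) := by
            rw [hvn]; simpa using hpneg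
          simp only [hlen', hnl, if_pos, decide_eq_true_eq, this, if_neg, not_false_iff]
          rw [idxFrom_congr li li' _ (n + 2) hlen' hagO, hO']
        have ihres := ih li' p n (by omega) (by omega)
          (by rw [hE2, hO2]; simp only [hE, hO, List.length_cons] at hf; omega)
        rw [ihres, hE2, hO2, List.zip_cons_cons, List.foldl_cons]

lemma fuel_enough (li : List Int) :
    min (idxFrom li (fun x => decide (x < 0)) 0).length
        (idxFrom li (fun x => decide (0 ≤ x)) 1).length < li.length + 1 := by
  have h := idxFrom_length li (fun x => decide (x < 0)) 0
  omega

-- ===== VERDICT (by name: the statement is the Claim_ definition above) =====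
theorem cross2_spec : Claim_equal_cross2 := by
  intro li _
  unfold Spec_cross2 cross2 cross2_alt
  rw [loop_eq (li.length + 1) li 0 1 rfl rfl (fuel_enough li)]
  rw [idxFrom_eq_filter li (fun x => decide (x < 0)) 0,
      idxFrom_eq_filter li (fun x => decide (0 ≤ x)) 1]
  norm_num
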